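/- GENERATED by c/gen_decode.py: decode facts of the image, one per distinct instruction byte string. -/
import UserX.DecodeImage

#decode_all ProgX.Base.Dec
  "410fb6c7"  -- movzx eax,r15b
  "4839d1"  -- cmp rcx,rdx
  "48890425f8ff3f00"  -- mov QWORD PTR ds:0x3ffff8,rax
  "488b0424"  -- mov rax,QWORD PTR [rsp]
  "48c1ef03"  -- shr rdi,0x3
  "498d6c1d00"  -- lea rbp,[r13+rbx*1+0x0]
  "55"  -- push rbp
  "660fefc0"  -- pxor xmm0,xmm0
  "741b"  -- je 1024dc
  "771d"  -- ja 1025f8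
  "83e207"  -- and edx,0x7
  "be01000000"  -- mov esi,0x1
  "e85ffbffff"  -- call 102040
  "e8d5fcffff"  -- call 103b00
  "eb2f"  -- jmp 101934
  "f20f1015b7d90300"  -- movsd xmm2,QWORD PTR [rip+0x3d9b7]
  "f20f58da"  -- addsd xmm3,xmm2
  "f20f5cca"  -- subsd xmm1,xmm2
  "f20f5ec0"  -- divsd xmm0,xmm0
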